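-- pv_equiv track=rewrite | github.com/DilipBDabahde/PythonExample | EvenDigit_Multi.py | EvenMulti
-- ===== SOURCE A (Python) =====
-- def EvenMulti(iNo):
-- 	if iNo == 0:
-- 		return 0;
--
-- 	if iNo < 0:	# modifier
-- 		iNo = -iNo;
--
-- 	mult = 1;
-- 	digit = 0;
-- 	while iNo != 0:
-- 		digit = iNo % 10;
-- 		if digit % 2 == 0:
-- 			mult = mult * digit;
-- 		iNo = iNo // 10;
--
--
-- 	if mult > 1:
-- 		return mult;
-- 	else:
-- 		return 0;
-- ===== SOURCE B (Python) =====
-- def EvenMulti(iNo):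
--     mult = 1
--     for c in str(abs(iNo)):
--         d = ord(c) - 48
--         if d % 2 == 0:
--             mult *= d
--     return mult if mult > 1 else 0
-- ===== Notes on version B (the rewrite author's own statement) =====
-- stated objective: idiomatic
-- what changed: Digits are enumerated by iterating the characters of str(abs(iNo)) (most-significant digit first, no special-cased early return) instead of a while loop of modulo/division arithmetic with manual abs.
import Mathlib
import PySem

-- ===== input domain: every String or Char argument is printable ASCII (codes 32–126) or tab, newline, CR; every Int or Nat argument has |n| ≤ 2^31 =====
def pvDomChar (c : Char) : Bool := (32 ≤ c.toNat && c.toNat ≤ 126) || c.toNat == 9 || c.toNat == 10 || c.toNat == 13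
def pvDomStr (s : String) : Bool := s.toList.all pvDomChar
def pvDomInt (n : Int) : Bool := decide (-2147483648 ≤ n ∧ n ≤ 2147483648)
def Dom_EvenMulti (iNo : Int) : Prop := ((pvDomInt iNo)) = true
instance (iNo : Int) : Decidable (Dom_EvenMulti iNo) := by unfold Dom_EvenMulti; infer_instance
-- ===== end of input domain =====

-- B enumerates the digits by iterating the characters of str(abs(iNo)) instead of A's
-- modulo/division arithmetic loop with its early-return guard and manual negation (idiomatic; same cost).

-- ===== PORT A =====
-- 'while iNo != 0: digit = iNo % 10; if digit % 2 == 0: mult = mult * digit; iNo = iNo // 10'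
-- The 'n ≤ 0' guard is a totality guard only: A reaches this loop with iNo > 0
-- (Python's loop would diverge on negative iNo, which is unreachable after the abs step).
def evenLoopA (n mult : Int) : Int :=
  if n ≤ 0 then mult
  else
    let digit := PySem.Int.mod n 10
    let mult' := if PySem.Int.mod digit 2 = 0 then mult * digit else mult
    evenLoopA (PySem.Int.floordiv n 10) mult'
termination_by n.toNat
decreasing_by
  rw [PySem.Int.floordiv_eq_ediv_of_pos (by norm_num : (0:Int) < 10)]
  omega

def EvenMulti (iNo : Int) : Int :=
  if iNo = 0 then 0
  else
    let iNo' := if iNo < 0 then -iNo else iNo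
    let mult := evenLoopA iNo' 1
    if mult > 1 then mult else 0

-- ===== PORT B =====
-- 'd = ord(c) - 48; if d % 2 == 0: mult *= d'
def evenStepB (m : Int) (c : Char) : Int :=
  let d : Int := (c.toNat : Int) - 48
  if PySem.Int.mod d 2 = 0 then m * d else m

def EvenMulti_alt (iNo : Int) : Int :=
  let mult := (PySem.Int.toStr (iNo.natAbs : Int)).toList.foldl evenStepB 1
  if mult > 1 then mult else 0

-- ===== PRECONDITION & SPEC =====
def Spec_EvenMulti (iNo : Int) (out : Int) : Prop := out = EvenMulti_alt iNo
instance (iNo : Int) (out : Int) : Decidable (Spec_EvenMulti iNo out) := by unfold Spec_EvenMulti; infer_instance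

-- ===== CLAIM (what is proved, stated in full; the proofs are below) =====
def Claim_equal_EvenMulti : Prop := ∀ (iNo : Int), Dom_EvenMulti iNo → Spec_EvenMulti iNo (EvenMulti iNo)

-- ===== LEMMAS AND PROOFS =====

-- the even-digit factor contributed by one decimal digit
def eD (d : Nat) : Int := if d % 2 = 0 then (d : Int) else 1

-- str(n) for n ≥ 0, most significant digit first, via the %10 // 10 digits
def revDigits (n : Nat) : List Char :=
  if n / 10 = 0 then [Nat.digitChar (n % 10)]
  else revDigits (n / 10) ++ [Nat.digitChar (n % 10)]
termination_by n
decreasing_by omega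

theorem toDigitsCore_eq_revDigits :
    ∀ (f n : Nat) (acc : List Char), n < f →
      Nat.toDigitsCore 10 f n acc = revDigits n ++ acc := by
  intro f
  induction f with
  | zero => omega
  | succ f ih =>
    intro n acc h
    rw [Nat.toDigitsCore, revDigits]
    by_cases h0 : n / 10 = 0
    · simp [h0]
    · simp only [h0, if_false]
      rw [ih (n / 10) _ (by omega)]
      simp

theorem evenStepB_digitChar (m : Int) (d : Nat) (hd : d < 10) :
    evenStepB m (Nat.digitChar d) = m * eD d := by
  interval_cases d <;> simp [evenStepB, eD, Nat.digitChar]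

theorem evenLoopA_nonpos (n m : Int) (h : n ≤ 0) : evenLoopA n m = m := by
  rw [evenLoopA]; simp [h]

theorem evenLoopA_mul :
    ∀ (n : Nat) (m k : Int), evenLoopA (n : Int) (m * k) = evenLoopA (n : Int) m * k := by
  intro n
  induction n using Nat.strong_induction_on with
  | _ n ih =>
    intro m k
    by_cases h : (n : Int) ≤ 0
    · rw [evenLoopA_nonpos _ _ h, evenLoopA_nonpos _ _ h]
    · conv_lhs => rw [evenLoopA]
      conv_rhs => rw [evenLoopA]
      simp only [h, if_false]
      have hdiv : PySem.Int.floordiv (n : Int) 10 = ((n / 10 : Nat) : Int) := by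
        rw [PySem.Int.floordiv_eq_ediv_of_pos (by norm_num : (0:Int) < 10)]
        exact_mod_cast rfl
      rw [hdiv]
      split_ifs with he
      · rw [show m * k * PySem.Int.mod (↑n) 10 = (m * PySem.Int.mod (↑n) 10) * k by ring]
        exact ih (n / 10) (by omega) _ k
      · exact ih (n / 10) (by omega) m k

theorem foldl_revDigits :
    ∀ (n : Nat) (m : Int), 0 < n → (revDigits n).foldl evenStepB m = evenLoopA (n : Int) m := by
  intro n
  induction n using Nat.strong_induction_on with
  | _ n ih =>
    intro m hn
    have hmod : PySem.Int.mod (n : Int) 10 = ((n % 10 : Nat) : Int) := by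
      rw [PySem.Int.mod_eq_emod_of_pos (by norm_num : (0:Int) < 10)]
      exact_mod_cast rfl
    have hdiv : PySem.Int.floordiv (n : Int) 10 = ((n / 10 : Nat) : Int) := by
      rw [PySem.Int.floordiv_eq_ediv_of_pos (by norm_num : (0:Int) < 10)]
      exact_mod_cast rfl
    have hmult : ∀ m : Int,
        (if PySem.Int.mod (PySem.Int.mod (n : Int) 10) 2 = 0
         then m * PySem.Int.mod (n : Int) 10 else m) = m * eD (n % 10) := by
      intro m
      rw [hmod, PySem.Int.mod_eq_emod_of_pos (by norm_num : (0:Int) < 2)]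
      unfold eD
      have hcast : (((n % 10 : Nat) : Int) % 2 = 0) ↔ ((n % 10) % 2 = 0) := by
        exact_mod_cast Iff.rfl
      split_ifs with h1 h2 h2
      · rfl
      · exact absurd (hcast.mp h1) h2
      · exact absurd (hcast.mpr h2) h1
      · exact (mul_one m).symm
    have hng : ¬ (n : Int) ≤ 0 := by exact_mod_cast Nat.not_le.mpr hn
    rw [revDigits]
    conv_rhs => rw [evenLoopA]
    simp only [hng, if_false]
    by_cases h0 : n / 10 = 0
    · simp only [h0, if_true, List.foldl_cons, List.foldl_nil]
      rw [evenStepB_digitChar m (n % 10) (by omega), hmult m, hdiv, h0]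
      rw [evenLoopA]
      simp
    · simp only [h0, if_false, List.foldl_append, List.foldl_cons, List.foldl_nil]
      rw [ih (n / 10) (by omega) m (by omega)]
      rw [evenStepB_digitChar _ (n % 10) (by omega), hmult m, hdiv]
      rw [evenLoopA_mul (n / 10) m (eD (n % 10))]

-- ===== VERDICT (by name: the statement is the Claim_ definition above) =====
theorem EvenMulti_spec : Claim_equal_EvenMulti := by
  intro iNo _
  unfold Spec_EvenMulti
  by_cases h0 : iNo = 0
  · subst h0; decide
  · have hpos : 0 < iNo.natAbs := Int.natAbs_pos.mpr h0
    have habs : (if iNo < 0 then -iNo else iNo) = (iNo.natAbs : Int) := by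
      split_ifs with h <;> omega
    rw [EvenMulti, EvenMulti_alt, if_neg h0]
    rw [PySem.Int.toList_toStr]
    have hchars : PySem.Int.toChars (iNo.natAbs : Int) = Nat.toDigits 10 iNo.natAbs := by
      unfold PySem.Int.toChars
      rw [if_neg (by omega)]
      norm_num
      congr 1
      rw [Int.abs_eq_natAbs]; exact Int.toNat_natCast _
    rw [hchars]
    unfold Nat.toDigits
    rw [toDigitsCore_eq_revDigits _ _ _ (by omega), List.append_nil]
    rw [foldl_revDigits iNo.natAbs 1 hpos, habs]
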